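-- pv_equiv track=rewrite | github.com/YuvrajSingh-mist/SmolHub-Website | regenerate_models.py | extract_framework_and_dataset
-- ===== SOURCE A (Python) =====
-- def extract_framework_and_dataset(readme_content, description):
--     """Extract framework and dataset information from readme content"""
--     framework = "PyTorch"  # Default
--     dataset = "Custom"     # Default
--     category = "Machine Learning"  # Default
--
--     # Look for framework mentions
--     content_lower = (readme_content + " " + description).lower()
--     if 'pytorch' in content_lower:
--         framework = "PyTorch"
--     elif 'tensorflow' in content_lower:
--         framework = "TensorFlow"
--     elif 'jax' in content_lower:
--         framework = "JAX"
--     elif 'huggingface' in content_lower: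
--         framework = "HuggingFace"
--
--     # Look for dataset mentions
--     if 'mnist' in content_lower:
--         dataset = "MNIST"
--     elif 'imagenet' in content_lower:
--         dataset = "ImageNet"
--     elif 'cifar' in content_lower:
--         dataset = "CIFAR"
--     elif 'coco' in content_lower:
--         dataset = "COCO"
--     elif 'flickr' in content_lower:
--         dataset = "Flickr"
--     elif 'cornell' in content_lower:
--         dataset = "Cornell Movie Dialog"
--     elif 'ultrafeedback' in content_lower:
--         dataset = "UltraFeedback"
--     elif 'gigaspeech' in content_lower:
--         dataset = "Gigaspeech"
--     elif 'custom' in content_lower: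
--         dataset = "Custom"
--
--     # Determine category based on model name and content
--     model_lower = (readme_content + " " + description).lower()
--     if any(term in model_lower for term in ['gpt', 'bert', 'llama', 'gemma', 'transformer', 'language', 'dpo', 'orpo', 'peft', 'lora']):
--         category = "Language Models"
--     elif any(term in model_lower for term in ['gan', 'dcgan', 'wgan', 'cgan', 'cyclegan', 'pix2pix']):
--         category = "Generative Models"
--     elif any(term in model_lower for term in ['vit', 'clip', 'vision', 'image', 'siglip', 'paligemma']):
--         category = "Computer Vision"
--     elif any(term in model_lower for term in ['whisper', 'tts', 'audio', 'clap']):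
--         category = "Audio Processing"
--     elif any(term in model_lower for term in ['vae', 'autoencoder']):
--         category = "Unsupervised Learning"
--     elif any(term in model_lower for term in ['rnn', 'lstm', 'gru', 'seq2seq', 'encoder', 'decoder']):
--         category = "Sequential Models"
--     elif any(term in model_lower for term in ['attention']):
--         category = "Attention Mechanisms"
--     elif any(term in model_lower for term in ['distributed', 'ddp', 'training']):
--         category = "Training Optimization"
--
--     return framework, dataset, category
-- ===== SOURCE B (Python) =====
-- # B: instead of running a separate substring search over the text for every keyword
-- # (three if/elif cascades of 'kw in text'), scan the text ONCE, position by position,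
-- # and build an index (set) of every known keyword that occurs; each of the three answers
-- # is then the minimum-rank table entry whose keyword group intersects the index.
--
-- RANKED_FRAMEWORKS = [
--     (0, ["pytorch"], "PyTorch"),
--     (1, ["tensorflow"], "TensorFlow"),
--     (2, ["jax"], "JAX"),
--     (3, ["huggingface"], "HuggingFace"),
-- ]
--
-- RANKED_DATASETS = [
--     (0, ["mnist"], "MNIST"),
--     (1, ["imagenet"], "ImageNet"),
--     (2, ["cifar"], "CIFAR"),
--     (3, ["coco"], "COCO"),
--     (4, ["flickr"], "Flickr"),
--     (5, ["cornell"], "Cornell Movie Dialog"),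
--     (6, ["ultrafeedback"], "UltraFeedback"),
--     (7, ["gigaspeech"], "Gigaspeech"),
--     (8, ["custom"], "Custom"),
-- ]
--
-- RANKED_CATEGORIES = [
--     (0, ["gpt", "bert", "llama", "gemma", "transformer", "language", "dpo", "orpo", "peft", "lora"], "Language Models"),
--     (1, ["gan", "dcgan", "wgan", "cgan", "cyclegan", "pix2pix"], "Generative Models"),
--     (2, ["vit", "clip", "vision", "image", "siglip", "paligemma"], "Computer Vision"),
--     (3, ["whisper", "tts", "audio", "clap"], "Audio Processing"),
--     (4, ["vae", "autoencoder"], "Unsupervised Learning"),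
--     (5, ["rnn", "lstm", "gru", "seq2seq", "encoder", "decoder"], "Sequential Models"),
--     (6, ["attention"], "Attention Mechanisms"),
--     (7, ["distributed", "ddp", "training"], "Training Optimization"),
-- ]
--
-- ALL_KEYWORDS = [k for table in (RANKED_FRAMEWORKS, RANKED_DATASETS, RANKED_CATEGORIES)
--                 for _, kws, _ in table for k in kws]
--
--
-- # keywords bucketed by first character, so each text position only tries a few candidates
-- BY_FIRST = {}
-- for _k in ALL_KEYWORDS:
--     BY_FIRST.setdefault(_k[0], []).append(_k)
--
--
-- def _index_keywords(text):
--     """One pass over the text: at each position, record every keyword starting there."""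
--     found = set()
--     for i in range(len(text)):
--         for k in BY_FIRST.get(text[i], ()):
--             if text.startswith(k, i):
--                 found.add(k)
--     return found
--
--
-- def _best(ranked, found, default):
--     """Label of the minimum-rank entry with some keyword in the index, else default."""
--     best_rank = None
--     best_label = default
--     for rank, keywords, label in ranked:
--         if (best_rank is None or rank < best_rank) and any(k in found for k in keywords):
--             best_rank, best_label = rank, label
--     return best_label
--
--
-- def extract_framework_and_dataset(readme_content, description):
--     text = (readme_content + " " + description).lower()
--     found = _index_keywords(text)
--     return (_best(RANKED_FRAMEWORKS, found, "PyTorch"),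
--             _best(RANKED_DATASETS, found, "Custom"),
--             _best(RANKED_CATEGORIES, found, "Machine Learning"))
-- ===== Notes on version B (the rewrite author's own statement) =====
-- stated objective: alternative
-- what changed: Instead of running a separate 'keyword in text' substring search for each of the 37 keywords in three if/elif cascades, B scans the text once position-by-position to build a set index of all known keywords occurring in it, then picks each answer as the minimum-rank table entry whose keyword group intersects that index.
import Mathlib
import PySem

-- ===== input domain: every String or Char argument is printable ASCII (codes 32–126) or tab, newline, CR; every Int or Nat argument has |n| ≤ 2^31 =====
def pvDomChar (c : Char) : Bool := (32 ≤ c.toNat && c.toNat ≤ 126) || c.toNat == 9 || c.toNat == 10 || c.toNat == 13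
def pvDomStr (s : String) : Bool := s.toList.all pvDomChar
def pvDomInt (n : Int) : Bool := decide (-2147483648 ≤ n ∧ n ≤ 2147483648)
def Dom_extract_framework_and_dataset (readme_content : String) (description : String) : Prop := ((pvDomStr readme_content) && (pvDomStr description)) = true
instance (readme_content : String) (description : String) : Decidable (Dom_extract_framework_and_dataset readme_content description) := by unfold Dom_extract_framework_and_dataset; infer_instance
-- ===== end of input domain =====

-- B replaces A's 37 separate 'keyword in text' substring searches by ONE position-by-position
-- scan of the text that builds a set of all known keywords occurring in it; each of the three
-- answers is then the minimum-rank table entry whose keyword group meets that set (objective: alternative).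

-- ===== PORT A =====
-- literal transliteration of A's if/elif cascades
def extract_framework_and_dataset (readme_content : String) (description : String) : String × String × String :=
  let content_lower := PySem.Str.lower (readme_content ++ " " ++ description)
  let framework :=
    if PySem.Str.isIn "pytorch" content_lower then "PyTorch"
    else if PySem.Str.isIn "tensorflow" content_lower then "TensorFlow"
    else if PySem.Str.isIn "jax" content_lower then "JAX"
    else if PySem.Str.isIn "huggingface" content_lower then "HuggingFace"
    else "PyTorch"
  let dataset :=
    if PySem.Str.isIn "mnist" content_lower then "MNIST"
    else if PySem.Str.isIn "imagenet" content_lower then "ImageNet"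
    else if PySem.Str.isIn "cifar" content_lower then "CIFAR"
    else if PySem.Str.isIn "coco" content_lower then "COCO"
    else if PySem.Str.isIn "flickr" content_lower then "Flickr"
    else if PySem.Str.isIn "cornell" content_lower then "Cornell Movie Dialog"
    else if PySem.Str.isIn "ultrafeedback" content_lower then "UltraFeedback"
    else if PySem.Str.isIn "gigaspeech" content_lower then "Gigaspeech"
    else if PySem.Str.isIn "custom" content_lower then "Custom"
    else "Custom"
  let model_lower := PySem.Str.lower (readme_content ++ " " ++ description)
  let category :=
    if (["gpt", "bert", "llama", "gemma", "transformer", "language", "dpo", "orpo", "peft", "lora"].any (fun t => PySem.Str.isIn t model_lower)) then "Language Models"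
    else if (["gan", "dcgan", "wgan", "cgan", "cyclegan", "pix2pix"].any (fun t => PySem.Str.isIn t model_lower)) then "Generative Models"
    else if (["vit", "clip", "vision", "image", "siglip", "paligemma"].any (fun t => PySem.Str.isIn t model_lower)) then "Computer Vision"
    else if (["whisper", "tts", "audio", "clap"].any (fun t => PySem.Str.isIn t model_lower)) then "Audio Processing"
    else if (["vae", "autoencoder"].any (fun t => PySem.Str.isIn t model_lower)) then "Unsupervised Learning"
    else if (["rnn", "lstm", "gru", "seq2seq", "encoder", "decoder"].any (fun t => PySem.Str.isIn t model_lower)) then "Sequential Models"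
    else if (["attention"].any (fun t => PySem.Str.isIn t model_lower)) then "Attention Mechanisms"
    else if (["distributed", "ddp", "training"].any (fun t => PySem.Str.isIn t model_lower)) then "Training Optimization"
    else "Machine Learning"
  (framework, dataset, category)

-- ===== PORT B =====
def pvRankedFrameworks : List (Int × List String × String) :=
  [(0, ["pytorch"], "PyTorch"), (1, ["tensorflow"], "TensorFlow"),
   (2, ["jax"], "JAX"), (3, ["huggingface"], "HuggingFace")]

def pvRankedDatasets : List (Int × List String × String) :=
  [(0, ["mnist"], "MNIST"), (1, ["imagenet"], "ImageNet"), (2, ["cifar"], "CIFAR"),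
   (3, ["coco"], "COCO"), (4, ["flickr"], "Flickr"), (5, ["cornell"], "Cornell Movie Dialog"),
   (6, ["ultrafeedback"], "UltraFeedback"), (7, ["gigaspeech"], "Gigaspeech"), (8, ["custom"], "Custom")]

def pvRankedCategories : List (Int × List String × String) :=
  [(0, ["gpt", "bert", "llama", "gemma", "transformer", "language", "dpo", "orpo", "peft", "lora"], "Language Models"),
   (1, ["gan", "dcgan", "wgan", "cgan", "cyclegan", "pix2pix"], "Generative Models"),
   (2, ["vit", "clip", "vision", "image", "siglip", "paligemma"], "Computer Vision"),
   (3, ["whisper", "tts", "audio", "clap"], "Audio Processing"),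
   (4, ["vae", "autoencoder"], "Unsupervised Learning"),
   (5, ["rnn", "lstm", "gru", "seq2seq", "encoder", "decoder"], "Sequential Models"),
   (6, ["attention"], "Attention Mechanisms"),
   (7, ["distributed", "ddp", "training"], "Training Optimization")]

def pvAllKeywords : List String :=
  (pvRankedFrameworks ++ pvRankedDatasets ++ pvRankedCategories).flatMap (fun e => e.2.1)

-- keywords bucketed by first character (BY_FIRST; k[0] via pyGet?, always some: every keyword is nonempty)
def pvByFirst : PySem.Dict Char (List String) :=
  pvAllKeywords.foldl
    (fun d k =>
      match PySem.Str.pyGet? k 0 with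
      | none => d
      | some c => PySem.Dict.insert d c (PySem.Dict.getD d c [] ++ [k]))
    PySem.Dict.empty

-- BY_FIRST.get(text[i], ()) (text[i] via pyGet?; none is unreachable for i < len(text))
def pvCandidates (text : String) (i : Nat) : List String :=
  match PySem.Str.pyGet? text (i : Int) with
  | none => []
  | some c => PySem.Dict.getD pvByFirst c []

-- one pass over the text: at each position record every bucketed keyword starting there
-- (text.startswith(k, i) with 0 ≤ i is exactly Chars.startswith on the i-th suffix)
def pvIndexKeywords (text : String) : PySem.Set String :=
  (List.range text.toList.length).foldl
    (fun found i =>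
      (pvCandidates text i).foldl
        (fun found k =>
          if PySem.Chars.startswith (text.toList.drop i) k.toList then PySem.Set.add found k else found)
        found)
    PySem.Set.empty

-- label of the minimum-rank entry with some keyword in the index, else default
def pvBest (ranked : List (Int × List String × String)) (found : PySem.Set String) (dflt : String) : String :=
  (ranked.foldl
    (fun (b : Option Int × String) e =>
      if ((match b.1 with | none => true | some r => decide (e.1 < r)) &&
          e.2.1.any (fun k => PySem.Set.contains found k)) then (some e.1, e.2.2) else b)
    (none, dflt)).2

def extract_framework_and_dataset_alt (readme_content : String) (description : String) : String × String × String :=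
  let text := PySem.Str.lower (readme_content ++ " " ++ description)
  let found := pvIndexKeywords text
  (pvBest pvRankedFrameworks found "PyTorch",
   pvBest pvRankedDatasets found "Custom",
   pvBest pvRankedCategories found "Machine Learning")

-- ===== PRECONDITION & SPEC =====
def Spec_extract_framework_and_dataset (readme_content : String) (description : String) (out : String × String × String) : Prop := out = extract_framework_and_dataset_alt readme_content description
instance (readme_content : String) (description : String) (out : String × String × String) : Decidable (Spec_extract_framework_and_dataset readme_content description out) := by unfold Spec_extract_framework_and_dataset; infer_instance

-- ===== CLAIM (what is proved, stated in full; the proofs are below) =====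
def Claim_equal_extract_framework_and_dataset : Prop := ∀ (readme_content : String) (description : String), Dom_extract_framework_and_dataset readme_content description → Spec_extract_framework_and_dataset readme_content description (extract_framework_and_dataset readme_content description)

-- ===== LEMMAS AND PROOFS =====

-- membership in the inner (per-position) fold
lemma pv_inner_mem (p : String → Bool) (kws : List String) (s : PySem.Set String) (x : String) :
    x ∈ kws.foldl (fun f k => if p k then PySem.Set.add f k else f) s ↔
      x ∈ s ∨ (x ∈ kws ∧ p x = true) := by
  induction kws generalizing s with
  | nil => simp
  | cons a rest ih =>
    simp only [List.foldl_cons, ih]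
    by_cases h : p a = true
    · rw [if_pos h]
      simp only [PySem.Set.mem_add, List.mem_cons]
      constructor
      · rintro ((hs | rfl) | ⟨hm, hp⟩)
        · exact Or.inl hs
        · exact Or.inr ⟨Or.inl rfl, h⟩
        · exact Or.inr ⟨Or.inr hm, hp⟩
      · rintro (hs | ⟨rfl | hm, hp⟩)
        · exact Or.inl (Or.inl hs)
        · exact Or.inl (Or.inr rfl)
        · exact Or.inr ⟨hm, hp⟩
    · rw [if_neg h]
      simp only [List.mem_cons]
      constructor
      · rintro (hs | ⟨hm, hp⟩)
        · exact Or.inl hs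
        · exact Or.inr ⟨Or.inr hm, hp⟩
      · rintro (hs | ⟨rfl | hm, hp⟩)
        · exact Or.inl hs
        · exact absurd hp h
        · exact Or.inr ⟨hm, hp⟩

-- membership in the outer (over positions) fold
lemma pv_outer_mem (q : Nat → String → Bool) (kws : Nat → List String) (rng : List Nat)
    (s : PySem.Set String) (x : String) :
    x ∈ rng.foldl (fun f i => (kws i).foldl (fun f k => if q i k then PySem.Set.add f k else f) f) s ↔
      x ∈ s ∨ ∃ i ∈ rng, x ∈ kws i ∧ q i x = true := by
  induction rng generalizing s with
  | nil => simp
  | cons a rest ih =>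
    simp only [List.foldl_cons, ih, pv_inner_mem, List.mem_cons]
    constructor
    · rintro ((hs | ⟨hm, hp⟩) | ⟨i, hi, hm, hp⟩)
      · exact Or.inl hs
      · exact Or.inr ⟨a, Or.inl rfl, hm, hp⟩
      · exact Or.inr ⟨i, Or.inr hi, hm, hp⟩
    · rintro (hs | ⟨i, (rfl | hi), hm, hp⟩)
      · exact Or.inl (Or.inl hs)
      · exact Or.inl (Or.inr ⟨hm, hp⟩)
      · exact Or.inr ⟨i, hi, hm, hp⟩

-- a bounded suffix match is exactly Python's 'sub in s' for nonempty sub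
lemma pv_bounded_isIn (sub cs : List Char) (h : sub ≠ []) :
    (∃ i ∈ List.range cs.length, PySem.Chars.startswith (cs.drop i) sub = true) ↔
      PySem.Chars.isIn sub cs = true := by
  rw [← PySem.Chars.exists_prefix_drop_iff_isIn]
  constructor
  · rintro ⟨i, _, hp⟩
    exact ⟨i, (PySem.Chars.startswith_iff _ _).mp hp⟩
  · rintro ⟨j, hp⟩
    by_cases hj : j < cs.length
    · exact ⟨j, List.mem_range.mpr hj, (PySem.Chars.startswith_iff _ _).mpr hp⟩
    · exfalso
      have : cs.drop j = [] := List.drop_eq_nil_of_le (le_of_not_gt hj)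
      rw [this] at hp
      exact h (List.prefix_nil.mp hp)

-- keyword-index membership coincides with A's substring test
set_option maxRecDepth 100000 in
lemma pv_contains_index (text kw : String) (hne : kw.toList ≠ [])
    (hmem : kw ∈ PySem.Dict.getD pvByFirst kw.toList.headI []) :
    PySem.Set.contains (pvIndexKeywords text) kw = PySem.Str.isIn kw text := by
  obtain ⟨tl, htl⟩ : ∃ tl, kw.toList = kw.toList.headI :: tl := by
    cases hkl : kw.toList with
    | nil => exact absurd hkl hne
    | cons a t => exact ⟨t, by simp⟩
  set c := kw.toList.headI with hcdef
  have hiff : PySem.Set.contains (pvIndexKeywords text) kw = true ↔ PySem.Str.isIn kw text = true := by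
    rw [PySem.Str.isIn_eq]
    unfold pvIndexKeywords
    rw [show (PySem.Set.contains (((List.range text.toList.length).foldl _ PySem.Set.empty)) kw = true) ↔
        kw ∈ ((List.range text.toList.length).foldl
          (fun found i => (pvCandidates text i).foldl
            (fun found k => if PySem.Chars.startswith (text.toList.drop i) k.toList then PySem.Set.add found k else found) found)
          PySem.Set.empty) from List.contains_iff_mem]
    rw [pv_outer_mem (fun i k => PySem.Chars.startswith (text.toList.drop i) k.toList) (pvCandidates text)]
    rw [← pv_bounded_isIn kw.toList text.toList hne]
    simp only [PySem.Set.empty, List.not_mem_nil, false_or]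
    constructor
    · rintro ⟨i, hi, _, hp⟩
      exact ⟨i, hi, hp⟩
    · rintro ⟨i, hi, hp⟩
      refine ⟨i, hi, ?_, hp⟩
      have hilt : i < text.toList.length := List.mem_range.mp hi
      have hpre : kw.toList <+: text.toList.drop i := (PySem.Chars.startswith_iff _ _).mp hp
      obtain ⟨t, ht⟩ := hpre
      rw [htl] at ht
      have hci : text.toList[i] = c := by
        have h0 : (text.toList.drop i).head? = some c := by rw [← ht]; rfl
        rw [List.head?_drop, List.getElem?_eq_getElem hilt] at h0
        exact Option.some_inj.mp h0
      have : pvCandidates text i = PySem.Dict.getD pvByFirst c [] := by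
        unfold pvCandidates
        rw [PySem.Str.pyGet?_natCast, List.getElem?_eq_getElem hilt, hci]
      rw [this]
      exact hmem
  exact Bool.eq_iff_iff.mpr hiff

-- once the best rank is r and every remaining rank is ≥ r, the fold is stuck
lemma pv_fold_stuck (rest : List (Int × List String × String)) (found : PySem.Set String)
    (r : Int) (lab : String) (h : ∀ e ∈ rest, ¬ e.1 < r) :
    rest.foldl
      (fun (b : Option Int × String) e =>
        if ((match b.1 with | none => true | some r' => decide (e.1 < r')) &&
            e.2.1.any (fun k => PySem.Set.contains found k)) then (some e.1, e.2.2) else b)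
      (some r, lab) = (some r, lab) := by
  induction rest with
  | nil => rfl
  | cons e rest ih =>
    have hne : ¬ e.1 < r := h e List.mem_cons_self
    simp only [List.foldl_cons]
    rw [if_neg (by simp [hne])]
    exact ih (fun e' he' => h e' (List.mem_cons_of_mem _ he'))

-- pvBest on an ascending-rank table is first-match
lemma pv_best_step (r : Int) (kws : List String) (lab : String)
    (rest : List (Int × List String × String)) (found : PySem.Set String) (dflt : String)
    (h : ∀ e ∈ rest, ¬ e.1 < r) :
    pvBest ((r, kws, lab) :: rest) found dflt =
      if kws.any (fun k => PySem.Set.contains found k) then lab else pvBest rest found dflt := by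
  unfold pvBest
  simp only [List.foldl_cons, Bool.true_and]
  by_cases hc : kws.any (fun k => PySem.Set.contains found k) = true
  · rw [if_pos hc, if_pos hc, pv_fold_stuck rest found r lab h]
  · rw [if_neg (by simpa using hc), if_neg (by simpa using hc)]

-- ===== VERDICT (by name: the statement is the Claim_ definition above) =====
set_option maxRecDepth 100000 in
set_option maxHeartbeats 4000000 in
theorem extract_framework_and_dataset_spec : Claim_equal_extract_framework_and_dataset := by
  intro readme_content description _
  show extract_framework_and_dataset readme_content description
      = extract_framework_and_dataset_alt readme_content description
  have hc : ∀ kw ∈ pvAllKeywords,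
      PySem.Set.contains (pvIndexKeywords (PySem.Str.lower (readme_content ++ " " ++ description))) kw
        = PySem.Str.isIn kw (PySem.Str.lower (readme_content ++ " " ++ description)) := by
    intro kw hm
    fin_cases hm <;> exact pv_contains_index _ _ (by decide) (by decide)
  simp only [extract_framework_and_dataset, extract_framework_and_dataset_alt,
    pvRankedFrameworks, pvRankedDatasets, pvRankedCategories]
  repeat rw [pv_best_step _ _ _ _ _ _ (by decide)]
  simp only [List.any_cons, List.any_nil, Bool.or_false, pvBest, List.foldl_nil]
  rw [hc "pytorch" (by decide),
      hc "tensorflow" (by decide),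
      hc "jax" (by decide),
      hc "huggingface" (by decide),
      hc "mnist" (by decide),
      hc "imagenet" (by decide),
      hc "cifar" (by decide),
      hc "coco" (by decide),
      hc "flickr" (by decide),
      hc "cornell" (by decide),
      hc "ultrafeedback" (by decide),
      hc "gigaspeech" (by decide),
      hc "custom" (by decide),
      hc "gpt" (by decide),
      hc "bert" (by decide),
      hc "llama" (by decide),
      hc "gemma" (by decide),
      hc "transformer" (by decide),
      hc "language" (by decide),
      hc "dpo" (by decide),
      hc "orpo" (by decide),
      hc "peft" (by decide),
      hc "lora" (by decide),
      hc "gan" (by decide),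
      hc "dcgan" (by decide),
      hc "wgan" (by decide),
      hc "cgan" (by decide),
      hc "cyclegan" (by decide),
      hc "pix2pix" (by decide),
      hc "vit" (by decide),
      hc "clip" (by decide),
      hc "vision" (by decide),
      hc "image" (by decide),
      hc "siglip" (by decide),
      hc "paligemma" (by decide),
      hc "whisper" (by decide),
      hc "tts" (by decide),
      hc "audio" (by decide),
      hc "clap" (by decide),
      hc "vae" (by decide),
      hc "autoencoder" (by decide),
      hc "rnn" (by decide),
      hc "lstm" (by decide),
      hc "gru" (by decide),
      hc "seq2seq" (by decide),
      hc "encoder" (by decide),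
      hc "decoder" (by decide),
      hc "attention" (by decide),
      hc "distributed" (by decide),
      hc "ddp" (by decide),
      hc "training" (by decide)]
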